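-- pv_equiv track=rewrite | github.com/f4nku4n/IMS-LOMONAS | test_suites/macroNAS/macroNAS.py | getGenotypeHash
-- ===== SOURCE A (Python) =====
-- def getGenotypeHash(genotype):
--     OPS_LIST = ['I', '1', '2']
--
--     genotypeHash = ''
--     for i, x in enumerate(genotype):
--         if i in [4, 8, 12]:
--             genotypeHash += '|'
--         if x != 0:
--             genotypeHash += OPS_LIST[x]
--     return genotypeHash
-- ===== SOURCE B (Python) =====
-- def getGenotypeHash(genotype):
--     OPS_LIST = ['I', '1', '2']
--     n = len(genotype)
--     starts = [0] + [b for b in (4, 8, 12) if b < n]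
--     segs = [genotype[s:e] for s, e in zip(starts, starts[1:] + [n])]
--     return '|'.join(''.join(OPS_LIST[x] for x in seg if x != 0) for seg in segs)
-- ===== Notes on version B (the rewrite author's own statement) =====
-- stated objective: alternative
-- what changed: B replaces A's per-index loop that tests every index against the separator positions 4/8/12 by a partition: it slices the genotype at the separator boundaries that fall inside its length, renders each slice, and '|'.joins the pieces.
import Mathlib
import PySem

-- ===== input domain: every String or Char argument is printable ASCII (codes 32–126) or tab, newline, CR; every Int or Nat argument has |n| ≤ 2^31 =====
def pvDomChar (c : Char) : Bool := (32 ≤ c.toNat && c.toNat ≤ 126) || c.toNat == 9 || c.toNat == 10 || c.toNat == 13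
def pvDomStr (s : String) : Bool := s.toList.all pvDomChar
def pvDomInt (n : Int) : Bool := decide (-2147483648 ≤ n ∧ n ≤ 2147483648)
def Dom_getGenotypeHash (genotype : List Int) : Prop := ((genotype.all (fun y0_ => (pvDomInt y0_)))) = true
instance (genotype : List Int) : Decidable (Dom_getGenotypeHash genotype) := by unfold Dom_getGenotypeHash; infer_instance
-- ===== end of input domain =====

-- B partitions the genotype at the boundaries 4/8/12 that fall inside it and
-- '|'.joins the rendered slices, instead of A's per-index separator test (objective: alternative).

-- ===== PORT A =====
-- OPS_LIST = ['I', '1', '2'] (as lists of code points; the result string is built on List Char)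
def pvOpsA : List (List Char) := [['I'], ['1'], ['2']]

def getGenotypeHash (genotype : List Int) : String :=
  String.ofList <|
    (PySem.List.enumerate genotype 0).foldl
      (fun acc p =>
        let acc := if p.1 = 4 ∨ p.1 = 8 ∨ p.1 = 12 then acc ++ ['|'] else acc
        if p.2 ≠ 0 then acc ++ ((PySem.List.pyGet? pvOpsA p.2).getD []) else acc)
      []

-- ===== PORT B =====
def pvOpsB : List (List Char) := [['I'], ['1'], ['2']]

def getGenotypeHash_alt (genotype : List Int) : String :=
  let n : Int := genotype.length
  let starts : List Int := 0 :: ([4, 8, 12].filter (fun b => b < n))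
  let segs : List (List Int) :=
    (starts.zip (starts.drop 1 ++ [n])).map
      (fun p => PySem.List.slice genotype (some p.1) (some p.2))
  String.ofList <|
    PySem.Chars.join ['|']
      (segs.map (fun seg =>
        PySem.Chars.join []
          ((seg.filter (fun x => x ≠ 0)).map
            (fun x => (PySem.List.pyGet? pvOpsB x).getD []))))

-- ===== PRECONDITION & SPEC =====
-- Pre_ excludes exactly the inputs where A's OPS_LIST[x] raises IndexError (x ≥ 3 or x ≤ -4).
def Pre_getGenotypeHash (genotype : List Int) : Prop :=
  ∀ x ∈ genotype, x ≠ 0 → (-3 ≤ x ∧ x < 3)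
instance (genotype : List Int) : Decidable (Pre_getGenotypeHash genotype) := by
  unfold Pre_getGenotypeHash; infer_instance

def pvWitness_getGenotypeHash : List Int := [1, 2, 0, -1, 2, 1]

def Spec_getGenotypeHash (genotype : List Int) (out : String) : Prop := out = getGenotypeHash_alt genotype
instance (genotype : List Int) (out : String) : Decidable (Spec_getGenotypeHash genotype out) := by unfold Spec_getGenotypeHash; infer_instance

-- ===== CLAIM (what is proved, stated in full; the proofs are below) =====
def Claim_equal_getGenotypeHash : Prop := ∀ (genotype : List Int), Dom_getGenotypeHash genotype → Pre_getGenotypeHash genotype → Spec_getGenotypeHash genotype (getGenotypeHash genotype)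

-- ===== LEMMAS AND PROOFS =====

-- the characters contributed by one element (empty when x = 0)
def pvOp (x : Int) : List Char :=
  if x ≠ 0 then (PySem.List.pyGet? pvOpsA x).getD [] else []

-- the characters contributed by one element at index k, including A's separator rule
def pvPiece (k : Int) (x : Int) : List Char :=
  (if k = 4 ∨ k = 8 ∨ k = 12 then ['|'] else []) ++ pvOp x

-- A's loop, index-explicit
def pvConcatP : Int → List Int → List Char
  | _, [] => []
  | k, x :: r => pvPiece k x ++ pvConcatP (k + 1) r

-- B's per-segment rendering
def pvRender (l : List Int) : List Char := l.flatMap pvOp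

lemma pvStep_eq (acc : List Char) (k x : Int) :
    (if x ≠ 0 then (if k = 4 ∨ k = 8 ∨ k = 12 then acc ++ ['|'] else acc)
        ++ ((PySem.List.pyGet? pvOpsA x).getD [])
     else if k = 4 ∨ k = 8 ∨ k = 12 then acc ++ ['|'] else acc)
      = acc ++ pvPiece k x := by
  simp only [pvPiece, pvOp]
  split_ifs <;> simp

lemma pvFoldl_eq (l : List Int) : ∀ (k : Int) (acc : List Char),
    (PySem.List.enumerate l k).foldl
      (fun acc p =>
        let acc := if p.1 = 4 ∨ p.1 = 8 ∨ p.1 = 12 then acc ++ ['|'] else acc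
        if p.2 ≠ 0 then acc ++ ((PySem.List.pyGet? pvOpsA p.2).getD []) else acc)
      acc = acc ++ pvConcatP k l := by
  induction l with
  | nil => intro k acc; simp [PySem.List.enumerate_nil, pvConcatP]
  | cons x r ih =>
    intro k acc
    rw [PySem.List.enumerate_cons]
    simp only [List.foldl_cons]
    rw [pvStep_eq acc k x, ih, pvConcatP, List.append_assoc]

lemma pvA_eq (genotype : List Int) :
    getGenotypeHash genotype = String.ofList (pvConcatP 0 genotype) := by
  rw [getGenotypeHash, pvFoldl_eq]
  simp

lemma pvConcatP_append (a b : List Int) : ∀ k : Int,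
    pvConcatP k (a ++ b) = pvConcatP k a ++ pvConcatP (k + a.length) b := by
  induction a with
  | nil => intro k; simp [pvConcatP]
  | cons x r ih =>
    intro k
    simp only [List.cons_append, pvConcatP, ih (k + 1), List.append_assoc,
      List.length_cons]
    have : k + 1 + (r.length : Int) = k + ((r.length : Int) + 1) := by ring
    rw [this]
    push_cast
    ring_nf

lemma pvConcatP_noSep (l : List Int) : ∀ k : Int,
    (∀ i : Int, k ≤ i → i < k + l.length → ¬(i = 4 ∨ i = 8 ∨ i = 12)) →
    pvConcatP k l = pvRender l := by
  induction l with
  | nil => intro k _; simp [pvConcatP, pvRender]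
  | cons x r ih =>
    intro k h
    have hl : (0:Int) ≤ r.length := by positivity
    have hk : ¬(k = 4 ∨ k = 8 ∨ k = 12) := by
      refine h k le_rfl ?_
      simp only [List.length_cons]
      push_cast
      omega
    rw [pvConcatP, pvPiece, if_neg hk, ih (k + 1)]
    · simp [pvRender]
    · intro i h1 h2
      refine h i (by omega) ?_
      simp only [List.length_cons] at h2 ⊢
      push_cast at h2 ⊢
      omega
-- boundary segment: a '|' for its first element, then plain rendering
lemma pvConcatP_boundary (y : Int) (d' : List Int) (k : Int)
    (hk : k = 4 ∨ k = 8 ∨ k = 12)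
    (h : ∀ i : Int, k + 1 ≤ i → i < k + 1 + d'.length → ¬(i = 4 ∨ i = 8 ∨ i = 12)) :
    pvConcatP k (y :: d') = '|' :: pvRender (y :: d') := by
  rw [pvConcatP, pvPiece, if_pos hk, pvConcatP_noSep d' (k + 1) h]
  simp [pvRender]

lemma pvJoin_nil_flatten : ∀ ps : List (List Char), PySem.Chars.join [] ps = ps.flatten
  | [] => PySem.Chars.join_nil []
  | [p] => by rw [PySem.Chars.join_singleton]; simp
  | p :: q :: rest => by
      rw [PySem.Chars.join_cons_cons, pvJoin_nil_flatten (q :: rest)]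
      simp

lemma pvRender_eq_join (l : List Int) :
    PySem.Chars.join []
      ((l.filter (fun x => x ≠ 0)).map (fun x => (PySem.List.pyGet? pvOpsB x).getD []))
      = pvRender l := by
  rw [pvJoin_nil_flatten]
  induction l with
  | nil => rfl
  | cons x r ih =>
    by_cases hx : x = 0
    · simp [hx, pvRender, pvOp] at ih ⊢
      simpa [pvRender] using ih
    · simp only [List.filter_cons, decide_eq_true_eq, hx, ne_eq, not_false_iff, if_pos,
        List.map_cons, List.flatten_cons, pvRender, List.flatMap_cons] at ih ⊢
      rw [ih]
      have : pvOpsB = pvOpsA := rfl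
      simp [pvOp, hx, this]

-- segment starting at a boundary: one '|' then plain rendering
lemma pvConcatP_seg (d : List Int) (k : Int)
    (hk : k = 4 ∨ k = 8 ∨ k = 12) (hne : d ≠ [])
    (h : ∀ i : Int, k < i → i < k + d.length → ¬(i = 4 ∨ i = 8 ∨ i = 12)) :
    pvConcatP k d = '|' :: pvRender d := by
  obtain ⟨y, d', rfl⟩ := List.exists_cons_of_ne_nil hne
  refine pvConcatP_boundary y d' k hk ?_
  intro i h1 h2
  refine h i (by omega) ?_
  simp only [List.length_cons]
  push_cast
  omega

lemma pvJoin_bar_cons (p q : List Char) (rest : List (List Char)) :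
    PySem.Chars.join ['|'] (p :: q :: rest) = p ++ '|' :: PySem.Chars.join ['|'] (q :: rest) := by
  rw [PySem.Chars.join_cons_cons]
  simp

-- ===== VERDICT (by name: the statement is the Claim_ definition above) =====
theorem getGenotypeHash_spec : Claim_equal_getGenotypeHash := by
  intro g _ _
  unfold Spec_getGenotypeHash
  rw [pvA_eq]
  simp only [getGenotypeHash_alt]
  set L := g.length with hL
  by_cases h4 : L ≤ 4
  · have hf : ([4, 8, 12].filter (fun b => b < (L:Int))) = ([] : List Int) := by
      rw [List.filter_eq_nil_iff]
      intro a ha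
      fin_cases ha <;> simp <;> omega
    have hs : PySem.List.slice g (some 0) (some (L:Int)) = g := by
      rw [PySem.List.slice_zero_start, PySem.List.slice_to g (by positivity)]
      simp [hL]
    simp only [hf, List.zip, List.drop, List.nil_append, List.zipWith, List.map_cons,
      List.map_nil, hs, PySem.Chars.join_singleton, pvRender_eq_join]
    rw [pvConcatP_noSep g 0 ?_]
    intro i h1 h2
    simp only [zero_add, ← hL] at h2
    omega
  · have c4 : ((4:Int) < (L:Int)) := by omega
    have hs1 : PySem.List.slice g (some 0) (some 4) = g.take 4 := by
      rw [PySem.List.slice_zero_start, PySem.List.slice_to g (by norm_num)]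
      rfl
    by_cases h8 : L ≤ 8
    · -- 4 < L ≤ 8: segments [g.take 4, g.drop 4]
      have hf : ([4, 8, 12].filter (fun b => b < (L:Int))) = [4] := by
        simp only [List.filter_cons, List.filter_nil]
        rw [if_pos (by simp; omega), if_neg (by simp; omega), if_neg (by simp; omega)]
      have hs2 : PySem.List.slice g (some 4) (some (L:Int)) = g.drop 4 := by
        rw [PySem.List.slice_toNat g (by norm_num) (by positivity)]
        rw [List.take_of_length_le (by simp [← hL])]
        rfl
      have hd : g.drop 4 ≠ [] := by
        intro h
        have := congrArg List.length h
        simp [← hL] at this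
        omega
      have hA : pvConcatP 0 g = pvRender (g.take 4) ++ ('|' :: pvRender (g.drop 4)) := by
        conv_lhs => rw [← List.take_append_drop 4 g]
        rw [pvConcatP_append]
        have hlt : (g.take 4).length = 4 := by simp [← hL]; omega
        rw [pvConcatP_noSep (g.take 4) 0
          (by intro i h1 h2; rw [hlt] at h2; push_cast at h2; omega)]
        rw [hlt]
        norm_num
        rw [pvConcatP_seg (g.drop 4) 4 (by norm_num) hd
          (by intro i h1 h2; simp only [List.length_drop, ← hL] at h2; omega)]
      simp only [hf, List.zip, List.drop, List.cons_append, List.nil_append, List.zipWith,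
        List.map_cons, List.map_nil, hs1, hs2, pvRender_eq_join, pvJoin_bar_cons,
        PySem.Chars.join_singleton, hA]
    · have c8 : ((8:Int) < (L:Int)) := by omega
      have hs2 : PySem.List.slice g (some 4) (some 8) = (g.drop 4).take 4 := by
        rw [PySem.List.slice_toNat g (by norm_num) (by norm_num)]
        rfl
      have hlt : (g.take 4).length = 4 := by simp [← hL]; omega
      have hlt1 : ((g.drop 4).take 4).length = 4 := by simp [← hL]; omega
      have hd1 : (g.drop 4).take 4 ≠ [] := by
        intro h
        have := congrArg List.length h
        rw [hlt1] at this
        simp at this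
      by_cases h12 : L ≤ 12
      · -- 8 < L ≤ 12: segments [g.take 4, (g.drop 4).take 4, g.drop 8]
        have hf : ([4, 8, 12].filter (fun b => b < (L:Int))) = [4, 8] := by
          simp only [List.filter_cons, List.filter_nil]
          rw [if_pos (by simp; omega), if_pos (by simp; omega), if_neg (by simp; omega)]
        have hs3 : PySem.List.slice g (some 8) (some (L:Int)) = g.drop 8 := by
          rw [PySem.List.slice_toNat g (by norm_num) (by positivity)]
          rw [List.take_of_length_le (by simp [← hL])]
          rfl
        have hd2 : g.drop 8 ≠ [] := by
          intro h
          have := congrArg List.length h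
          simp [← hL] at this
          omega
        have hA : pvConcatP 0 g = pvRender (g.take 4) ++
            ('|' :: (pvRender ((g.drop 4).take 4) ++ '|' :: pvRender (g.drop 8))) := by
          conv_lhs => rw [← List.take_append_drop 4 g]
          rw [pvConcatP_append]
          rw [pvConcatP_noSep (g.take 4) 0
            (by intro i h1 h2; rw [hlt] at h2; push_cast at h2; omega)]
          rw [hlt]
          norm_num
          conv_lhs => rw [← List.take_append_drop 4 (g.drop 4)]
          rw [pvConcatP_append]
          rw [pvConcatP_seg ((g.drop 4).take 4) 4 (by norm_num) hd1
            (by intro i h1 h2; rw [hlt1] at h2; push_cast at h2; omega)]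
          rw [hlt1]
          norm_num
          rw [pvConcatP_seg (g.drop 8) 8 (by norm_num) hd2
            (by intro i h1 h2; simp only [List.length_drop, ← hL] at h2; omega)]
        simp only [hf, List.zip, List.drop, List.cons_append, List.nil_append, List.zipWith,
          List.map_cons, List.map_nil, hs1, hs2, hs3, pvRender_eq_join, pvJoin_bar_cons,
          PySem.Chars.join_singleton, hA]
      · -- 12 < L: segments [g.take 4, (g.drop 4).take 4, (g.drop 8).take 4, g.drop 12]
        have hf : ([4, 8, 12].filter (fun b => b < (L:Int))) = [4, 8, 12] := by
          simp only [List.filter_cons, List.filter_nil]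
          rw [if_pos (by simp; omega), if_pos (by simp; omega), if_pos (by simp; omega)]
        have hs3 : PySem.List.slice g (some 8) (some 12) = (g.drop 8).take 4 := by
          rw [PySem.List.slice_toNat g (by norm_num) (by norm_num)]
          rfl
        have hs4 : PySem.List.slice g (some 12) (some (L:Int)) = g.drop 12 := by
          rw [PySem.List.slice_toNat g (by norm_num) (by positivity)]
          rw [List.take_of_length_le (by simp [← hL])]
          rfl
        have hlt2 : ((g.drop 8).take 4).length = 4 := by simp [← hL]; omega
        have hd2 : (g.drop 8).take 4 ≠ [] := by
          intro h
          have := congrArg List.length h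
          rw [hlt2] at this
          simp at this
        have hd3 : g.drop 12 ≠ [] := by
          intro h
          have := congrArg List.length h
          simp [← hL] at this
          omega
        have hA : pvConcatP 0 g = pvRender (g.take 4) ++
            ('|' :: (pvRender ((g.drop 4).take 4) ++
              ('|' :: (pvRender ((g.drop 8).take 4) ++ '|' :: pvRender (g.drop 12))))) := by
          conv_lhs => rw [← List.take_append_drop 4 g]
          rw [pvConcatP_append]
          rw [pvConcatP_noSep (g.take 4) 0
            (by intro i h1 h2; rw [hlt] at h2; push_cast at h2; omega)]
          rw [hlt]
          norm_num
          conv_lhs => rw [← List.take_append_drop 4 (g.drop 4)]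
          rw [pvConcatP_append]
          rw [pvConcatP_seg ((g.drop 4).take 4) 4 (by norm_num) hd1
            (by intro i h1 h2; rw [hlt1] at h2; push_cast at h2; omega)]
          rw [hlt1]
          norm_num
          conv_lhs => rw [← List.take_append_drop 4 (g.drop 8)]
          rw [pvConcatP_append]
          rw [pvConcatP_seg ((g.drop 8).take 4) 8 (by norm_num) hd2
            (by intro i h1 h2; rw [hlt2] at h2; push_cast at h2; omega)]
          rw [hlt2]
          norm_num
          rw [pvConcatP_seg (g.drop 12) 12 (by norm_num) hd3
            (by intro i h1 h2; omega)]
        simp only [hf, List.zip, List.drop, List.cons_append, List.nil_append, List.zipWith,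
          List.map_cons, List.map_nil, hs1, hs2, hs3, hs4, pvRender_eq_join, pvJoin_bar_cons,
          PySem.Chars.join_singleton, hA]
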